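-- pv_equiv track=rewrite | github.com/babakanatoliy1-beep/vinytki | task_3.py | first_vacant_row
-- ===== SOURCE A (Python) =====
-- def first_vacant_row(seats):
--     """Повернути перший ряд,
--     в якому є найбільше вільних місць та їх кількість.
--     Повертається нумерація рядів із 1.
--     Якщо вільних місць немає, повернути 0, 0.
--     Параметры: - seats (list of list): інформація про продані квитки
--     (1 - продано, 0 - ні). Результат: -
--     tuple (ряд, кількість місць). """
--     max_count = 0
--     max_row = 0
--
--     for row_index, row in enumerate(seats, 1):#Нумерація повинна починатись з 1, а enumerate починає з 0
--         available_seats_count = row.count(0)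
--
--         if available_seats_count > max_count:#За умовою потрібно перший ряд з максимумом, а >= вибере останній
--             max_row = row_index
--             max_count = available_seats_count
--
--     if max_count == 0:
--         return 0, 0
--
--     return max_row, max_count#Якщо немає вільних місць, потрібно повертати (0, 0) Ця умова не перевіряється
-- ===== SOURCE B (Python) =====
-- def first_vacant_row(seats):
--     counts = [row.count(0) for row in seats]
--     m = max(counts, default=0)
--     if m == 0:
--         return 0, 0
--     return counts.index(m) + 1, m
-- ===== Notes on version B (the rewrite author's own statement) =====
-- stated objective: simpler
-- what changed: Instead of A's single-pass running argmax with (max_row, max_count) state, B works in three stages: build the per-row free-seat counts, take their plain maximum value (no index tracking), and then locate that value's first position with list.index.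
import Mathlib
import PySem

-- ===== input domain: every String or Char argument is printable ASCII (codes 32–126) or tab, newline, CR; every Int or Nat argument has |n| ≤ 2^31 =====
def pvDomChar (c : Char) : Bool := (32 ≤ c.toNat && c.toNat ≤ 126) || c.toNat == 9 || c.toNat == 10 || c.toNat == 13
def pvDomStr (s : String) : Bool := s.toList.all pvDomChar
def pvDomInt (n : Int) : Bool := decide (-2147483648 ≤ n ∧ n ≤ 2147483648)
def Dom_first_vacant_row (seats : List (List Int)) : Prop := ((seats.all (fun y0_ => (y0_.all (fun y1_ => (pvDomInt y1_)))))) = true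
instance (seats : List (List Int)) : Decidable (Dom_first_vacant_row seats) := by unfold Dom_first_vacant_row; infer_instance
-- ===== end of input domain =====

-- B replaces A's single-pass running argmax by three stages: a counts table, a plain maximum value, and a first-position lookup (list.index); same result, simpler decomposition.


-- ===== PORT A =====
-- A: running maximum over enumerate(seats, 1), strict '>' so the first maximal row wins;
-- state is (max_row, max_count); final guard returns (0,0) when max_count = 0.
def first_vacant_row (seats : List (List Int)) : Int × Int :=
  let st := (PySem.List.enumerate seats 1).foldl
    (fun (st : Int × Int) p =>
      let available_seats_count : Int := (PySem.List.count p.2 0 : Int)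
      if available_seats_count > st.2 then (p.1, available_seats_count) else st)
    (0, 0)
  if st.2 = 0 then (0, 0) else st

-- ===== PORT B =====
-- B: counts table; m = max(counts, default=0) (a VALUE, no index tracked); if m = 0 return (0,0),
-- else counts.index(m) + 1 gives the first row attaining it. The 'none' arm of index is
-- unreachable: m ≠ 0 forces counts nonempty, and the maximum is a member of counts
-- (Python's counts.index(m) cannot raise there).
def first_vacant_row_alt (seats : List (List Int)) : Int × Int :=
  let counts : List Int := seats.map (fun row => (PySem.List.count row 0 : Int))
  let m : Int := (PySem.List.max? counts (fun y => y)).getD 0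
  if m = 0 then (0, 0)
  else
    match PySem.List.index? counts m with
    | some k => ((k : Int) + 1, m)
    | none => (0, 0)

-- ===== PRECONDITION & SPEC =====
def Spec_first_vacant_row (seats : List (List Int)) (out : Int × Int) : Prop := out = first_vacant_row_alt seats
instance (seats : List (List Int)) (out : Int × Int) : Decidable (Spec_first_vacant_row seats out) := by unfold Spec_first_vacant_row; infer_instance

-- ===== CLAIM (what is proved, stated in full; the proofs are below) =====
def Claim_equal_first_vacant_row : Prop := ∀ (seats : List (List Int)), Dom_first_vacant_row seats → Spec_first_vacant_row seats (first_vacant_row seats)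

-- ===== LEMMAS AND PROOFS =====

-- A's loop step, on (index, count) pairs
def pvStep (b p : Int × Int) : Int × Int := if p.2 > b.2 then p else b

-- A's fold over enumerate(seats) equals the pvStep fold over enumerate of the counts table
lemma pvA_fold_eq (seats : List (List Int)) (i : Int) (s : Int × Int) :
    (PySem.List.enumerate seats i).foldl
      (fun (st : Int × Int) p =>
        let c : Int := (PySem.List.count p.2 0 : Int)
        if c > st.2 then (p.1, c) else st) s
    = (PySem.List.enumerate (seats.map (fun row => (PySem.List.count row 0 : Int))) i).foldl
        pvStep s := by
  induction seats generalizing i s with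
  | nil => simp [PySem.List.enumerate_nil]
  | cons x xs ih =>
    simp only [List.map_cons, PySem.List.enumerate_cons, List.foldl_cons, pvStep]
    exact ih _ _

-- characterisation of the running argmax: it stays at the seed when nothing exceeds c,
-- and otherwise lands on the first occurrence of the maximum
lemma pvFold_char (cs : List Int) (i r c : Int) :
    (cs.foldl max c ≤ c →
      (PySem.List.enumerate cs i).foldl pvStep (r, c) = (r, c)) ∧
    (c < cs.foldl max c →
      ∃ k : Nat, PySem.List.index? cs (cs.foldl max c) = some k ∧
        (PySem.List.enumerate cs i).foldl pvStep (r, c) = (i + (k : Int), cs.foldl max c)) := by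
  induction cs generalizing i r c with
  | nil =>
    constructor
    · intro _; simp [PySem.List.enumerate_nil]
    · intro h; simp at h
  | cons a t ih =>
    simp only [List.foldl_cons, PySem.List.enumerate_cons, pvStep]
    by_cases ha : a > c
    · rw [if_pos ha, max_eq_right (le_of_lt ha)]
      have hM := (PySem.List.le_foldl_max t a).1
      constructor
      · intro h; omega
      · intro _
        by_cases ht : t.foldl max a ≤ a
        · have hMa : t.foldl max a = a := le_antisymm ht hM
          refine ⟨0, ?_, ?_⟩
          · rw [hMa]; exact PySem.List.index?_cons_self a t
          · rw [(ih (i + 1) i a).1 ht]; simp [hMa]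
        · obtain ⟨k, hk, hres⟩ := (ih (i + 1) i a).2 (lt_of_not_ge ht)
          have hne : a ≠ t.foldl max a := by omega
          refine ⟨k + 1, ?_, ?_⟩
          · rw [PySem.List.index?_cons_of_ne t hne, hk]; rfl
          · rw [hres]
            simp only [Prod.mk.injEq, and_true]
            push_cast; ring
    · rw [if_neg ha, max_eq_left (le_of_not_gt ha)]
      constructor
      · intro h; exact (ih (i + 1) r c).1 h
      · intro h
        obtain ⟨k, hk, hres⟩ := (ih (i + 1) r c).2 h
        have hMmem := ((PySem.List.le_foldl_max t c).1)
        have hne : a ≠ t.foldl max c := by omega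
        refine ⟨k + 1, ?_, ?_⟩
        · rw [PySem.List.index?_cons_of_ne t hne, hk]; rfl
        · rw [hres]
          simp only [Prod.mk.injEq, and_true]
          push_cast; ring

-- every count is a Nat cast, hence nonnegative
lemma pvCounts_nonneg (seats : List (List Int)) :
    ∀ x ∈ seats.map (fun row => (PySem.List.count row 0 : Int)), 0 ≤ x := by
  intro x hx
  simp only [List.mem_map] at hx
  obtain ⟨row, _, hr⟩ := hx
  exact hr ▸ Int.natCast_nonneg _

-- ===== VERDICT (by name: the statement is the Claim_ definition above) =====
theorem first_vacant_row_spec : Claim_equal_first_vacant_row := by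
  intro seats _
  unfold Spec_first_vacant_row first_vacant_row first_vacant_row_alt
  rw [pvA_fold_eq]
  cases hm : seats.map (fun row => (PySem.List.count row 0 : Int)) with
  | nil => simp [PySem.List.enumerate_nil, PySem.List.max?]
  | cons a t =>
    have hnn := pvCounts_nonneg seats
    rw [hm] at hnn
    have ha0 : 0 ≤ a := hnn a (by simp)
    simp only [PySem.List.max?_id_cons, Option.getD_some]
    have hfold : (a :: t).foldl max 0 = t.foldl max a := by
      simp [List.foldl_cons, max_eq_right ha0]
    by_cases hz : t.foldl max a = 0
    · -- maximum is 0: A's fold never updates, both sides give (0,0)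
      have hle : (a :: t).foldl max 0 ≤ 0 := by rw [hfold, hz]
      rw [(pvFold_char (a :: t) 1 0 0).1 hle]
      simp [hz]
    · -- maximum is positive: A's fold lands on its first occurrence
      have hM := (PySem.List.le_foldl_max t a).1
      have hpos : 0 < (a :: t).foldl max 0 := by rw [hfold]; omega
      obtain ⟨k, hk, hres⟩ := (pvFold_char (a :: t) 1 0 0).2 hpos
      rw [hres]
      rw [hfold] at hk
      simp only [if_neg hz]
      rw [show (1 : Int) + (k : Int) = (k : Int) + 1 by ring]
      have hne : ¬ ((1 : Int) + (k : Int)) = 0 → True := fun _ => trivial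
      rw [hfold]
      rw [if_neg hz, hk]
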